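-- pv_equiv track=rewrite | github.com/Amborsia/BaekjoonHub | 프로그래머스/2/132265. 롤케이크 자르기/롤케이크 자르기.py | solution
-- ===== SOURCE A (Python) =====
-- from collections import Counter
--
-- def solution(topping):
--     right_counter = Counter(topping)
--     left_counter = Counter()
--
--     left_unique = 0
--     right_unique = len(right_counter)
--
--     count = 0
--
--     for t in topping:
--         right_counter[t] -=1
--         if right_counter[t] == 0:
--             right_unique -=1
--         if left_counter[t] == 0:
--             left_unique +=1
--         left_counter[t] +=1
--
--         if left_unique == right_unique:
--             count+=1
--
--     return count
-- ===== SOURCE B (Python) =====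
-- def solution(topping):
--     # Backward pass: suffix[j] = number of distinct toppings in topping[j:] (suffix[n] = 0).
--     seen = set()
--     suffix = [0]
--     for t in reversed(topping):
--         seen.add(t)
--         suffix.append(len(seen))
--     suffix.reverse()
--     # Forward pass: grow the left-side set and compare with the precomputed right-side counts.
--     left = set()
--     count = 0
--     for t, r in zip(topping, suffix[1:]):
--         left.add(t)
--         if len(left) == r:
--             count += 1
--     return count
-- ===== Notes on version B (the rewrite author's own statement) =====
-- stated objective: alternative
-- what changed: A's single simultaneous dual-Counter pass is replaced by two phases: a backward pass precomputing a table of suffix distinct-topping counts, then a forward pass growing a left-side set and comparing its size against the precomputed table.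
import Mathlib
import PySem

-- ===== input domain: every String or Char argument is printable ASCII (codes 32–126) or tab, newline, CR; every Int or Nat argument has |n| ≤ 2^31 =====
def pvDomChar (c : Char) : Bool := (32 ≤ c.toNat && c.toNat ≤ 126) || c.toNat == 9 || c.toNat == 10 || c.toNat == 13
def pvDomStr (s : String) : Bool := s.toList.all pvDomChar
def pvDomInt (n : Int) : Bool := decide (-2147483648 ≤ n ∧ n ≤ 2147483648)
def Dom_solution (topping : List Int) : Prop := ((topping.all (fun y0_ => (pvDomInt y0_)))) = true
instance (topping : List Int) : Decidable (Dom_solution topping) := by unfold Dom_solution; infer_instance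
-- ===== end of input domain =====

-- B replaces A's simultaneous dual-Counter pass by a backward precompute of suffix
-- distinct counts followed by a forward set-growing comparison pass (objective: alternative).

-- ===== PORT A =====
-- state = (right_counter, left_counter, left_unique, right_unique, count)
def solutionStep (s : PySem.Dict Int Int × PySem.Dict Int Int × Int × Int × Int) (t : Int) :
    PySem.Dict Int Int × PySem.Dict Int Int × Int × Int × Int :=
  let rc := s.1.modify t 0 (· - 1)                      -- right_counter[t] -= 1
  let ru := if rc.getD t 0 == 0 then s.2.2.2.1 - 1 else s.2.2.2.1
  let lu := if s.2.1.getD t 0 == 0 then s.2.2.1 + 1 else s.2.2.1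
  let lc := s.2.1.modify t 0 (· + 1)                    -- left_counter[t] += 1
  let cnt := if lu == ru then s.2.2.2.2 + 1 else s.2.2.2.2
  (rc, lc, lu, ru, cnt)

def solution (topping : List Int) : Int :=
  let rc := PySem.Dict.counter topping
  (topping.foldl solutionStep (rc, PySem.Dict.empty, 0, (rc.size : Int), 0)).2.2.2.2

-- ===== PORT B =====
-- backward pass: seen set grows, suffix list of distinct counts is appended to
def solutionAltBack (s : PySem.Set Int × List Int) (t : Int) : PySem.Set Int × List Int :=
  let seen := PySem.Set.add s.1 t
  (seen, s.2 ++ [(PySem.Set.len seen : Int)])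

-- forward pass: grow left set, compare with precomputed right-side count
def solutionAltFwd (s : PySem.Set Int × Int) (p : Int × Int) : PySem.Set Int × Int :=
  let left := PySem.Set.add s.1 p.1
  (left, if ((PySem.Set.len left : Int) == p.2) then s.2 + 1 else s.2)

def solution_alt (topping : List Int) : Int :=
  let suffix := ((topping.reverse.foldl solutionAltBack (PySem.Set.empty, [(0 : Int)])).2).reverse
  ((List.zip topping (PySem.List.slice suffix (some 1) none)).foldl
      solutionAltFwd (PySem.Set.empty, 0)).2

-- ===== PRECONDITION & SPEC =====
def Spec_solution (topping : List Int) (out : Int) : Prop := out = solution_alt topping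
instance (topping : List Int) (out : Int) : Decidable (Spec_solution topping out) := by unfold Spec_solution; infer_instance

-- ===== CLAIM (what is proved, stated in full; the proofs are below) =====
def Claim_equal_solution : Prop := ∀ (topping : List Int), Dom_solution topping → Spec_solution topping (solution topping)

-- ===== LEMMAS AND PROOFS =====

-- number of distinct elements of a list
def du (l : List Int) : Int := (l.toFinset.card : Int)

-- the common reference count: fair cut positions, consuming rest with pre already cut off
def specCount (pre rest : List Int) : Int :=
  match rest with
  | [] => 0
  | t :: r => (if du (pre ++ [t]) = du r then 1 else 0) + specCount (pre ++ [t]) r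

theorem toFinset_append_singleton (l : List Int) (t : Int) :
    (l ++ [t]).toFinset = insert t l.toFinset := by
  simp [List.toFinset_append]

theorem du_append_singleton (l : List Int) (t : Int) :
    du (l ++ [t]) = if t ∈ l then du l else du l + 1 := by
  rw [du, du, toFinset_append_singleton]
  by_cases h : t ∈ l
  · simp [Finset.insert_eq_self.mpr (List.mem_toFinset.mpr h), h]
  · rw [Finset.card_insert_of_notMem (by simpa using h)]
    simp [h]

theorem du_cons (t : Int) (l : List Int) :
    du (t :: l) = if t ∈ l then du l else du l + 1 := by
  rw [du, du, List.toFinset_cons]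
  by_cases h : t ∈ l
  · simp [Finset.insert_eq_self.mpr (List.mem_toFinset.mpr h), h]
  · rw [Finset.card_insert_of_notMem (by simpa using h)]
    simp [h]

theorem du_reverse (l : List Int) : du l.reverse = du l := by
  simp [du]

theorem ofList_toFinset (l : List Int) : (PySem.Set.ofList l).toFinset = l.toFinset := by
  ext x; simp [List.mem_toFinset, PySem.Set.mem_ofList]

theorem len_ofList (l : List Int) : ((PySem.Set.ofList l).length : Int) = du l := by
  rw [du, ← List.toFinset_card_of_nodup (PySem.Set.nodup_ofList l), ofList_toFinset]

theorem ofList_append_singleton (l : List Int) (t : Int) :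
    PySem.Set.ofList (l ++ [t]) = PySem.Set.add (PySem.Set.ofList l) t := by
  simp [PySem.Set.ofList_eq_foldl, List.foldl_append]

-- ---- A's side: loop invariant over the two counters ----
theorem A_step (pre r : List Int) (t : Int) (rc lc : PySem.Dict Int Int) (c : Int)
    (hrc : ∀ x, rc.getD x 0 = ((t :: r).count x : Int))
    (hlc : ∀ x, lc.getD x 0 = (pre.count x : Int)) :
    solutionStep (rc, lc, du pre, du (t :: r), c) t =
      (rc.modify t 0 (· - 1), lc.modify t 0 (· + 1), du (pre ++ [t]), du r,
       if du (pre ++ [t]) = du r then c + 1 else c) := by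
  simp only [solutionStep, PySem.Dict.getD_modify_self, hrc, hlc,
    List.count_cons_self, du_cons, du_append_singleton, beq_iff_eq]
  have h1 : ((r.count t : Int) + 1 - 1 = 0) ↔ t ∉ r := by
    constructor
    · intro h; exact List.count_eq_zero.mp (by omega)
    · intro h; rw [List.count_eq_zero.mpr h]; simp
  have h2 : ((pre.count t : Int) = 0) ↔ t ∉ pre := by
    constructor
    · intro h; exact List.count_eq_zero.mp (by exact_mod_cast h)
    · intro h; rw [List.count_eq_zero.mpr h]; simp
  by_cases ht : t ∈ r <;> by_cases hp : t ∈ pre <;>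
    simp [h1, h2, ht, hp] <;> split_ifs <;> simp_all

theorem A_loop (rest : List Int) : ∀ (pre : List Int) (rc lc : PySem.Dict Int Int) (c : Int),
    (∀ x, rc.getD x 0 = (rest.count x : Int)) →
    (∀ x, lc.getD x 0 = (pre.count x : Int)) →
    (rest.foldl solutionStep (rc, lc, du pre, du rest, c)).2.2.2.2 = c + specCount pre rest := by
  induction rest with
  | nil => intro pre rc lc c _ _; simp [specCount]
  | cons t r ih =>
    intro pre rc lc c hrc hlc
    rw [List.foldl_cons, A_step pre r t rc lc c hrc hlc,
      ih (pre ++ [t]) _ _ _ ?_ ?_]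
    · rw [specCount]
      generalize specCount (pre ++ [t]) r = q
      split_ifs <;> omega
    · intro x
      rw [PySem.Dict.getD_modify]
      rcases eq_or_ne x t with h | h
      · subst h; rw [if_pos rfl, hrc]; simp [List.count_cons_self]
      · rw [if_neg h, hrc]
        simp [List.count_cons, Ne.symm h]
    · intro x
      rw [PySem.Dict.getD_modify]
      rcases eq_or_ne x t with h | h
      · subst h; rw [if_pos rfl, hlc]; simp [List.count_append]
      · rw [if_neg h, hlc]; simp [List.count_append, Ne.symm h]

theorem solution_eq_specCount (topping : List Int) : solution topping = specCount [] topping := by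
  have hu : solution topping = (topping.foldl solutionStep
      (PySem.Dict.counter topping, PySem.Dict.empty, 0,
        ((PySem.Dict.counter topping).size : Int), 0)).2.2.2.2 := rfl
  rw [hu]
  have hkl : (PySem.Dict.counter topping).size = (PySem.Dict.counter topping).keys.length := by
    simp [PySem.Dict.size, PySem.Dict.keys]
  have hsize : ((PySem.Dict.counter topping).size : Int) = du topping := by
    rw [hkl, PySem.Dict.keys_counter, len_ofList]
  have h := A_loop topping [] (PySem.Dict.counter topping) PySem.Dict.empty 0
      (fun x => by simp [PySem.Dict.getD_counter]) (fun x => by simp [PySem.Dict.getD_empty])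
  have hdu0 : du [] = (0 : Int) := rfl
  rw [hdu0] at h
  simpa [hsize] using h

-- ---- B's side: the backward pass builds the table of prefix distinct counts ----
theorem B_back (l : List Int) : ∀ (p : List Int) (acc : List Int),
    l.foldl solutionAltBack (PySem.Set.ofList p, acc) =
      (PySem.Set.ofList (p ++ l),
       acc ++ (List.range l.length).map (fun k => du (p ++ l.take (k + 1)))) := by
  induction l with
  | nil => intro p acc; simp
  | cons t l' ih =>
    intro p acc
    have hstep : solutionAltBack (PySem.Set.ofList p, acc) t =
        (PySem.Set.ofList (p ++ [t]), acc ++ [du (p ++ [t])]) := by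
      simp only [solutionAltBack, ← ofList_append_singleton, PySem.Set.len, len_ofList]
    rw [List.foldl_cons, hstep, ih (p ++ [t])]
    simp only [List.length_cons, List.range_succ_eq_map, List.map_cons, List.map_map]
    simp [List.append_assoc]

-- ---- B's side: the forward pass counts agreements with the table ----
theorem B_fwd (rest : List Int) : ∀ (pre : List Int) (c : Int),
    ((List.zip rest ((List.range rest.length).map (fun i => du (rest.drop (i + 1))))).foldl
        solutionAltFwd (PySem.Set.ofList pre, c)).2 = c + specCount pre rest := by
  induction rest with
  | nil => intro pre c; simp [specCount]
  | cons t r ih =>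
    intro pre c
    rw [List.length_cons, List.range_succ_eq_map]
    simp only [List.map_cons, List.map_map, List.zip_cons_cons, List.foldl_cons]
    have hstep : solutionAltFwd (PySem.Set.ofList pre, c) (t, du ((t :: r).drop (0 + 1))) =
        (PySem.Set.ofList (pre ++ [t]), if du (pre ++ [t]) = du r then c + 1 else c) := by
      simp only [solutionAltFwd, ← ofList_append_singleton, PySem.Set.len, len_ofList,
        beq_iff_eq, List.drop_succ_cons, List.drop_zero]
    rw [hstep]
    have hmap : (List.map ((fun i => du (List.drop (i + 1) (t :: r))) ∘ (· + 1)) (List.range r.length))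
        = List.map (fun i => du (List.drop (i + 1) r)) (List.range r.length) := by
      simp [Function.comp]
    rw [hmap, ih (pre ++ [t])]
    rw [specCount]
    generalize specCount (pre ++ [t]) r = q
    split_ifs <;> omega

theorem map_range_reverse (f : Nat → Int) (n : Nat) :
    (List.map f (List.range n)).reverse = List.map (fun i => f (n - 1 - i)) (List.range n) := by
  induction n with
  | zero => simp
  | succ m ih =>
    have hR : List.map (fun i => f (m + 1 - 1 - i)) (List.range (m + 1))
        = f m :: List.map (fun i => f (m - 1 - i)) (List.range m) := by
      rw [List.range_succ_eq_map, List.map_cons, List.map_map]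
      simp only [Nat.sub_zero, Nat.add_sub_cancel]
      congr 1
      apply List.map_congr_left
      intro a ha
      have := List.mem_range.mp ha
      simp only [Function.comp]
      congr 1
      omega
    rw [hR, ← ih, List.range_succ, List.map_append, List.reverse_append]
    simp

-- the reversed table, past its first entry, lists the suffix distinct counts in order
theorem suffix_eq (topping : List Int) :
    PySem.List.slice (((topping.reverse.foldl solutionAltBack (PySem.Set.empty, [(0 : Int)])).2).reverse)
        (some 1) none =
      (List.range topping.length).map (fun i => du (topping.drop (i + 1))) := by
  rw [PySem.List.slice_from_one,
    show (PySem.Set.empty : PySem.Set Int) = PySem.Set.ofList [] from rfl, B_back]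
  simp only [List.nil_append, List.length_reverse]
  have step1 : (List.map (fun k => du (topping.reverse.take (k + 1))) (List.range topping.length))
      = List.map (fun k => du (topping.drop (topping.length - 1 - k))) (List.range topping.length) := by
    apply List.map_congr_left
    intro k hk
    have hk' := List.mem_range.mp hk
    have hd : topping.reverse.take (k + 1) = (topping.drop (topping.length - (k + 1))).reverse := by
      rw [List.reverse_drop]
      congr 1
      omega
    rw [hd, du_reverse]
    congr 2
    omega
  rw [step1, List.reverse_append, map_range_reverse]
  simp only [List.reverse_cons, List.reverse_nil, List.nil_append]
  have step2 : (List.map (fun i => du (topping.drop (topping.length - 1 - (topping.length - 1 - i))))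
        (List.range topping.length))
      = List.map (fun i => du (topping.drop i)) (List.range topping.length) := by
    apply List.map_congr_left
    intro k hk
    have := List.mem_range.mp hk
    congr 2
    omega
  rw [step2]
  have step3 : List.map (fun i => du (topping.drop i)) (List.range topping.length) ++ [(0 : Int)]
      = List.map (fun i => du (topping.drop i)) (List.range (topping.length + 1)) := by
    rw [List.range_succ, List.map_append]
    simp [List.drop_length, du]
  rw [step3, List.range_succ_eq_map, List.map_cons, List.tail_cons, List.map_map]
  apply List.map_congr_left
  intro a _
  simp [Function.comp]

theorem solution_alt_eq_specCount (topping : List Int) :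
    solution_alt topping = specCount [] topping := by
  have hu : solution_alt topping = ((List.zip topping (PySem.List.slice
      (((topping.reverse.foldl solutionAltBack (PySem.Set.empty, [(0 : Int)])).2).reverse)
      (some 1) none)).foldl solutionAltFwd (PySem.Set.empty, 0)).2 := rfl
  rw [hu, suffix_eq]
  have h := B_fwd topping [] 0
  simpa using h

-- ===== VERDICT (by name: the statement is the Claim_ definition above) =====
theorem solution_spec : Claim_equal_solution := by
  intro topping _
  unfold Spec_solution
  rw [solution_eq_specCount, solution_alt_eq_specCount]
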